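-- pv_equiv track=rewrite | github.com/Jin-chen1/On-demand-Delivery | src/simulation/dispatchers/ortools_dispatcher.py | _route_to_tasks
-- ===== SOURCE A (Python) =====
-- from typing import Dict, List, Tuple, Optional, Any
--
-- def _route_to_tasks(
--
--     route: List[int],
--     order_location_map: Dict[int, Dict[str, int]],
--     locations: List[int]
-- ) -> List[Tuple[str, int, int]]:
--     """
--     将路线节点索引转换为任务列表
--
--     Args:
--         route: 路线节点索引列表 [location_idx, ...]
--         order_location_map: 订单位置映射 {order_id: {'pickup': idx, 'delivery': idx}}
--         locations: 位置节点列表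
--
--     Returns:
--         任务列表 [(action, order_id, node_id), ...]
--     """
--     tasks = []
--
--     # 反向映射：location_idx -> (order_id, action)
--     idx_to_order_action = {}
--     for order_id, loc_map in order_location_map.items():
--         idx_to_order_action[loc_map['pickup']] = (order_id, 'pickup')
--         idx_to_order_action[loc_map['delivery']] = (order_id, 'delivery')
--
--     # 转换路线
--     for location_idx in route:
--         if location_idx in idx_to_order_action:
--             order_id, action = idx_to_order_action[location_idx]
--             node_id = locations[location_idx]
--             tasks.append((action, order_id, node_id))
--
--     return tasks
-- ===== SOURCE B (Python) =====
-- def _route_to_tasks(route, order_location_map, locations):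
--     """For each route index, look the matching order up directly in the
--     order map (no reverse index): return the first order whose pickup or
--     delivery sits at that index."""
--     tasks = []
--     for idx in route:
--         for order_id, loc_map in order_location_map.items():
--             if loc_map['pickup'] == idx:
--                 tasks.append(('pickup', order_id, locations[idx]))
--                 break
--             if loc_map['delivery'] == idx:
--                 tasks.append(('delivery', order_id, locations[idx]))
--                 break
--     return tasks
-- ===== Notes on version B (the rewrite author's own statement) =====
-- stated objective: alternative
-- what changed: B drops A's prebuilt reverse-index dict and instead scans the order map directly for each route index, stopping at the first order whose pickup or delivery matches; Pre_ excludes inputs where a route index occurs twice among the pickup/delivery entries, on which A's dict last-write-wins value is accidental.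
import Mathlib
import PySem

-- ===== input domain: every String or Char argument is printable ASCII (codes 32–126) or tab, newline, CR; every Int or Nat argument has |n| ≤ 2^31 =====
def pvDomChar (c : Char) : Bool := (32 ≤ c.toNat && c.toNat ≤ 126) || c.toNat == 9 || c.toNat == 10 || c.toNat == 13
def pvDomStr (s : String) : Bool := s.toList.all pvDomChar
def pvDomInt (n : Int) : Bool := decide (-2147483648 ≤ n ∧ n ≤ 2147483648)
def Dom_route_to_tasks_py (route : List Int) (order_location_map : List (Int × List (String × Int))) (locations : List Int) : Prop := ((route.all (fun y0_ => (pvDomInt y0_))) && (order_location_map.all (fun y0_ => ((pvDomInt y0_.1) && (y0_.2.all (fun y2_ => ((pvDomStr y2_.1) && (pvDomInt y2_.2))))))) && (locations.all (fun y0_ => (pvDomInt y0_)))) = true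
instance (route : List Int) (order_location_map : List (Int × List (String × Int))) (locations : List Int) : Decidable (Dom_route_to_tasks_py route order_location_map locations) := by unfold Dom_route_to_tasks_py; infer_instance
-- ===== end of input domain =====

-- ===== PORT A =====
-- B replaces A's prebuilt reverse-index dict with a direct first-match scan of
-- the order map; Pre_ makes the matched order unique, so the two agree.

-- loc_map['pickup'] / loc_map['delivery']: dict lookup (first match); Pre_
-- guarantees the key is present (Python raises KeyError otherwise), so the
-- getD default 0 is never reached inside Pre_.
def pvGetKey (lm : List (String × Int)) (k : String) : Int :=
  ((PySem.Dict.mk lm).get? k).getD 0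

def pvBuildIdx (order_location_map : List (Int × List (String × Int))) :
    PySem.Dict Int (Int × String) :=
  order_location_map.foldl
    (fun d p =>
      (d.insert (pvGetKey p.2 "pickup") (p.1, "pickup")).insert
        (pvGetKey p.2 "delivery") (p.1, "delivery"))
    PySem.Dict.empty

def route_to_tasks_py (route : List Int) (order_location_map : List (Int × List (String × Int))) (locations : List Int) : List (String × Int × Int) :=
  let idxMap := pvBuildIdx order_location_map
  route.foldl
    (fun tasks idx =>
      match idxMap.get? idx with
      | some oa => tasks ++ [(oa.2, oa.1, (PySem.List.pyGet? locations idx).getD 0)]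
      | none => tasks)
    []

-- ===== PORT B =====
-- first match in the order map: pickup checked before delivery, break on hit
def pvScanB (order_location_map : List (Int × List (String × Int))) (idx : Int) :
    Option (String × Int) :=
  match order_location_map with
  | [] => none
  | p :: rest =>
      if pvGetKey p.2 "pickup" = idx then some ("pickup", p.1)
      else if pvGetKey p.2 "delivery" = idx then some ("delivery", p.1)
      else pvScanB rest idx

def route_to_tasks_py_alt (route : List Int) (order_location_map : List (Int × List (String × Int))) (locations : List Int) : List (String × Int × Int) :=
  match route with
  | [] => []
  | idx :: rest =>
      match pvScanB order_location_map idx with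
      | some ao => (ao.1, ao.2, (PySem.List.pyGet? locations idx).getD 0)
            :: route_to_tasks_py_alt rest order_location_map locations
      | none => route_to_tasks_py_alt rest order_location_map locations

-- ===== PRECONDITION & SPEC =====
-- all pickup/delivery location indices, in A's insertion order
def pvKeys (order_location_map : List (Int × List (String × Int))) : List Int :=
  order_location_map.flatMap (fun p => [pvGetKey p.2 "pickup", pvGetKey p.2 "delivery"])

-- Pre_ excludes exactly: (a) inputs where Python A raises — a loc_map missing
-- the 'pickup'/'delivery' key (KeyError), or a matched route index outside
-- Python's negative-index range for locations (IndexError); (b) association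
-- lists with duplicate keys, which no Python dict argument can represent; and
-- (c) inputs where some ROUTE index occurs twice among the pickup/delivery
-- entries, on which A's reverse-dict last-write-wins value is accidental.
def Pre_route_to_tasks_py (route : List Int) (order_location_map : List (Int × List (String × Int))) (locations : List Int) : Prop :=
  (order_location_map.map (·.1)).Nodup ∧
  (∀ p ∈ order_location_map,
      (p.2.map (·.1)).Nodup ∧
      (PySem.Dict.mk p.2).contains "pickup" = true ∧
      (PySem.Dict.mk p.2).contains "delivery" = true) ∧
  (∀ idx ∈ route, (pvKeys order_location_map).count idx ≤ 1) ∧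
  (∀ idx ∈ route, idx ∈ pvKeys order_location_map →
      -(locations.length : Int) ≤ idx ∧ idx < (locations.length : Int))
instance (route : List Int) (order_location_map : List (Int × List (String × Int))) (locations : List Int) : Decidable (Pre_route_to_tasks_py route order_location_map locations) := by unfold Pre_route_to_tasks_py; infer_instance

def pvWitness_route_to_tasks_py : List Int × (List (Int × List (String × Int))) × List Int :=
  ([0, 2, 1], [(7, [("pickup", 0), ("delivery", 1)]), (9, [("pickup", 2), ("delivery", 3)])], [10, 20, 30, 40])

def Spec_route_to_tasks_py (route : List Int) (order_location_map : List (Int × List (String × Int))) (locations : List Int) (out : List (String × Int × Int)) : Prop := out = route_to_tasks_py_alt route order_location_map locations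
instance (route : List Int) (order_location_map : List (Int × List (String × Int))) (locations : List Int) (out : List (String × Int × Int)) : Decidable (Spec_route_to_tasks_py route order_location_map locations out) := by unfold Spec_route_to_tasks_py; infer_instance

-- ===== CLAIM =====
def Claim_equal_route_to_tasks_py : Prop := ∀ (route : List Int) (order_location_map : List (Int × List (String × Int))) (locations : List Int), Dom_route_to_tasks_py route order_location_map locations → Pre_route_to_tasks_py route order_location_map locations → Spec_route_to_tasks_py route order_location_map locations (route_to_tasks_py route order_location_map locations)

-- ===== LEMMAS AND PROOFS =====

-- A's reverse-index lookup, written as a last-match fold over the order map.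
lemma get?_foldl_insert_eq_scan
    (olm : List (Int × List (String × Int))) (idx : Int)
    (d : PySem.Dict Int (Int × String)) :
    (olm.foldl
        (fun d p =>
          (d.insert (pvGetKey p.2 "pickup") (p.1, "pickup")).insert
            (pvGetKey p.2 "delivery") (p.1, "delivery")) d).get? idx
      = olm.foldl
          (fun acc p =>
            let acc1 := if pvGetKey p.2 "pickup" = idx then some (p.1, "pickup") else acc
            if pvGetKey p.2 "delivery" = idx then some (p.1, "delivery") else acc1)
          (d.get? idx) := by
  induction olm generalizing d with
  | nil => rfl
  | cons p rest ih =>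
      simp only [List.foldl_cons]
      rw [ih]
      congr 1
      rw [PySem.Dict.get?_insert, PySem.Dict.get?_insert]
      by_cases h1 : idx = pvGetKey p.2 "delivery" <;>
        by_cases h2 : idx = pvGetKey p.2 "pickup" <;>
        simp [h1, h2, eq_comm]

-- the last-match fold leaves the accumulator alone when nothing in olm matches
lemma lastScan_no_match
    (olm : List (Int × List (String × Int))) (idx : Int)
    (acc : Option (Int × String)) (h : idx ∉ pvKeys olm) :
    olm.foldl
        (fun acc p =>
          let acc1 := if pvGetKey p.2 "pickup" = idx then some (p.1, "pickup") else acc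
          if pvGetKey p.2 "delivery" = idx then some (p.1, "delivery") else acc1)
        acc = acc := by
  induction olm generalizing acc with
  | nil => rfl
  | cons p rest ih =>
      simp only [pvKeys, List.flatMap_cons, List.mem_append, List.mem_cons] at h
      push Not at h
      obtain ⟨⟨hp, hd, -⟩, hrest⟩ := h
      simp only [List.foldl_cons]
      rw [show (let acc1 := if pvGetKey p.2 "pickup" = idx then some (p.1, "pickup") else acc
          if pvGetKey p.2 "delivery" = idx then some (p.1, "delivery") else acc1) = acc by
            simp [Ne.symm hp, Ne.symm hd]]
      exact ih acc (by simpa [pvKeys] using hrest)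

-- with pairwise-distinct keys, A's lookup agrees with B's first-match scan
lemma buildIdx_get?_eq_scanB
    (olm : List (Int × List (String × Int))) (idx : Int)
    (hnd : (pvKeys olm).count idx ≤ 1) :
    (pvBuildIdx olm).get? idx = (pvScanB olm idx).map (fun ao => (ao.2, ao.1)) := by
  unfold pvBuildIdx
  rw [get?_foldl_insert_eq_scan]
  have hemp : (PySem.Dict.empty : PySem.Dict Int (Int × String)).get? idx = none := rfl
  rw [hemp]
  induction olm with
  | nil => rfl
  | cons p rest ih =>
      simp only [pvKeys, List.flatMap_cons, List.cons_append, List.nil_append,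
        List.count_cons] at hnd
      simp only [List.foldl_cons, pvScanB]
      by_cases hp : pvGetKey p.2 "pickup" = idx
      · have hd : ¬ pvGetKey p.2 "delivery" = idx := by
          intro h; simp [hp, h] at hnd
        have hz : (pvKeys rest).count idx = 0 := by
          simp [hp, hd] at hnd; simpa [pvKeys] using hnd
        simp only [hp, hd, if_true, if_false]
        rw [lastScan_no_match rest idx _ (List.count_eq_zero.mp hz)]
        rfl
      · by_cases hd : pvGetKey p.2 "delivery" = idx
        · have hz : (pvKeys rest).count idx = 0 := by
            simp [hp, hd] at hnd; simpa [pvKeys] using hnd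
          simp only [hp, hd, if_true, if_false]
          rw [lastScan_no_match rest idx _ (List.count_eq_zero.mp hz)]
          rfl
        · simp only [hp, hd, if_false]
          exact ih (by simp [hp, hd] at hnd; simpa [pvKeys] using hnd)

-- the two output loops agree given pointwise agreement of the per-index lookup
lemma foldA_eq_tasksB
    (olm : List (Int × List (String × Int))) (locs : List Int)
    (route : List Int)
    (h : ∀ idx ∈ route, (pvBuildIdx olm).get? idx = (pvScanB olm idx).map (fun ao => (ao.2, ao.1)))
    (acc : List (String × Int × Int)) :
    route.foldl
        (fun tasks idx =>
          match (pvBuildIdx olm).get? idx with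
          | some oa => tasks ++ [(oa.2, oa.1, (PySem.List.pyGet? locs idx).getD 0)]
          | none => tasks)
        acc = acc ++ route_to_tasks_py_alt route olm locs := by
  induction route generalizing acc with
  | nil => simp [route_to_tasks_py_alt]
  | cons idx rest ih =>
      simp only [List.foldl_cons]
      rw [ih (fun i hi => h i (List.mem_cons_of_mem _ hi))]
      rw [show route_to_tasks_py_alt (idx :: rest) olm locs =
        (match pvScanB olm idx with
         | some ao => (ao.1, ao.2, (PySem.List.pyGet? locs idx).getD 0)
              :: route_to_tasks_py_alt rest olm locs
         | none => route_to_tasks_py_alt rest olm locs) from rfl]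
      rw [h idx (List.mem_cons_self ..)]
      cases pvScanB olm idx with
      | none => rfl
      | some ao => simp

-- ===== VERDICT =====
theorem route_to_tasks_py_spec : Claim_equal_route_to_tasks_py := by
  intro route olm locs _ hpre
  obtain ⟨-, -, hnd, -⟩ := hpre
  unfold Spec_route_to_tasks_py route_to_tasks_py
  exact foldA_eq_tasksB olm locs route
    (fun idx hi => buildIdx_get?_eq_scanB olm idx (hnd idx hi)) []
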